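-- pv_equiv track=rewrite | github.com/lostwalle268/password-auditor | auditor.py | is_sequential
-- ===== SOURCE A (Python) =====
-- def is_sequential(pw: str) -> bool:
--     """Detect ascending or descending sequences like 'abcd' or '1234' (simple heuristic)."""
--     seq = "abcdefghijklmnopqrstuvwxyz"
--     num = "0123456789"
--     pw_low = pw.lower()
--     length = len(pw_low)
--     for size in (4, 3):  # check chunks of length 4 and 3
--         for i in range(length - size + 1):
--             chunk = pw_low[i:i+size]
--             if chunk in seq or chunk[::-1] in seq:  # forward or backward
--                 return True
--             if chunk in num or chunk[::-1] in num:
--                 return True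
--     return False
-- ===== SOURCE B (Python) =====
-- SEQ = "abcdefghijklmnopqrstuvwxyz"
-- NUM = "0123456789"
--
-- def is_sequential(pw: str) -> bool:
--     """Single pass: run-length counters for ascending and descending steps."""
--     s = pw.lower()
--     if not s:
--         return False
--     asc = desc = 1
--     prev = s[0]
--     for cur in s[1:]:
--         asc = asc + 1 if (prev + cur in SEQ or prev + cur in NUM) else 1
--         desc = desc + 1 if (cur + prev in SEQ or cur + prev in NUM) else 1
--         if asc >= 3 or desc >= 3:
--             return True
--         prev = cur
--     return False
-- ===== Notes on version B (the rewrite author's own statement) =====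
-- stated objective: simpler
-- what changed: Replaced A's two nested fixed-window scans (sizes 4 and 3, each doing four substring searches over the alphabet/digit strings) with a single pass over the lowercased password that keeps ascending and descending run-length counters and reports a run of length 3.
import Mathlib
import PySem

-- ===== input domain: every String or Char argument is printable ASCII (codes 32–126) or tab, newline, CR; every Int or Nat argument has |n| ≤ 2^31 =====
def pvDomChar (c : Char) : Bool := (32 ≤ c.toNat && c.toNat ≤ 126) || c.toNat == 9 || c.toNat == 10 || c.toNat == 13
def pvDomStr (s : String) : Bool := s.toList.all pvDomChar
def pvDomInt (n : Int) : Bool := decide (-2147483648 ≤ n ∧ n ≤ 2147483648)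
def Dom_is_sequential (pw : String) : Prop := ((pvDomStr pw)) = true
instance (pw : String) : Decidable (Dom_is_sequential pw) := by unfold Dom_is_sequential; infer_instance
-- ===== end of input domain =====

-- B replaces A's nested fixed-window substring scans with a single pass keeping
-- ascending/descending run-length counters (objective: simpler one-pass algorithm).

-- ===== PORT A =====
-- literal transliteration of A: windows of size 4 then 3, substring tests forward and reversed
def is_sequential (pw : String) : Bool :=
  let seq := "abcdefghijklmnopqrstuvwxyz".toList
  let num := "0123456789".toList
  let pw_low := PySem.Chars.lower pw.toList
  let length : Int := pw_low.length
  ([4, 3] : List Int).any fun size =>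
    (PySem.List.pyRange 0 (length - size + 1) 1).any fun i =>
      let chunk := PySem.List.slice pw_low (some i) (some (i + size))
      -- chunk[::-1] is chunk.reverse (PySem.List.slice?_none_none_neg_one)
      (PySem.Chars.isIn chunk seq || PySem.Chars.isIn chunk.reverse seq) ||
      (PySem.Chars.isIn chunk num || PySem.Chars.isIn chunk.reverse num)

-- ===== PORT B =====
def pvSEQ : List Char := "abcdefghijklmnopqrstuvwxyz".toList
def pvNUM : List Char := "0123456789".toList

-- 'prev+cur in SEQ or prev+cur in NUM'
def pvStep (a b : Char) : Bool :=
  PySem.Chars.isIn [a, b] pvSEQ || PySem.Chars.isIn [a, b] pvNUM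

-- the for-loop of Source B: prev, asc, desc are the loop state
def pvLoop (prev : Char) (asc desc : Nat) : List Char → Bool
  | [] => false
  | cur :: rest =>
    let asc' := if pvStep prev cur then asc + 1 else 1
    let desc' := if pvStep cur prev then desc + 1 else 1
    if 3 ≤ asc' || 3 ≤ desc' then true else pvLoop cur asc' desc' rest

def is_sequential_alt (pw : String) : Bool :=
  match PySem.Chars.lower pw.toList with
  | [] => false
  | c :: rest => pvLoop c 1 1 rest

-- ===== PRECONDITION & SPEC =====
def Spec_is_sequential (pw : String) (out : Bool) : Prop := out = is_sequential_alt pw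
instance (pw : String) (out : Bool) : Decidable (Spec_is_sequential pw out) := by unfold Spec_is_sequential; infer_instance

-- ===== CLAIM (what is proved, stated in full; the proofs are below) =====
def Claim_equal_is_sequential : Prop := ∀ (pw : String), Dom_is_sequential pw → Spec_is_sequential pw (is_sequential pw)

-- ===== LEMMAS AND PROOFS =====

-- A's window condition on a chunk
def pvChunkCond (t : List Char) : Bool :=
  (PySem.Chars.isIn t pvSEQ || PySem.Chars.isIn t.reverse pvSEQ) ||
  (PySem.Chars.isIn t pvNUM || PySem.Chars.isIn t.reverse pvNUM)

-- reference spec: some adjacent triple is a two-step ascending or descending run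
def pvSpec2 : List Char → Bool
  | a :: b :: c :: r => (pvStep a b && pvStep b c) || (pvStep c b && pvStep b a) || pvSpec2 (b :: c :: r)
  | _ => false

-- (F1) a 3-infix gives its two 2-infixes
lemma isIn_pair_of_triple (a b c : Char) (s : List Char)
    (h : PySem.Chars.isIn [a, b, c] s = true) :
    PySem.Chars.isIn [a, b] s = true ∧ PySem.Chars.isIn [b, c] s = true := by
  rw [PySem.Chars.isIn_iff_infix] at h ⊢
  rw [PySem.Chars.isIn_iff_infix]
  constructor
  · exact (List.IsPrefix.isInfix ⟨[c], rfl⟩).trans h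
  · exact (List.IsSuffix.isInfix ⟨[a], rfl⟩).trans h

-- (F2) in a nodup list two chained 2-infixes glue to a 3-infix
lemma isIn_triple_of_pairs (a b c : Char) (s : List Char) (hnd : s.Nodup)
    (h1 : PySem.Chars.isIn [a, b] s = true) (h2 : PySem.Chars.isIn [b, c] s = true) :
    PySem.Chars.isIn [a, b, c] s = true := by
  rw [← PySem.Chars.exists_prefix_drop_iff_isIn] at h1 h2 ⊢
  obtain ⟨j, t, ht⟩ := h1
  obtain ⟨k, u, hu⟩ := h2
  simp only [List.cons_append, List.nil_append] at ht hu
  have hb : s[j+1]? = some b := by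
    have := List.getElem?_drop (xs := s) (i := j) (j := 1)
    rw [← ht] at this; simpa using this.symm
  have hbk : s[k]? = some b := by
    have := List.getElem?_drop (xs := s) (i := k) (j := 0)
    rw [← hu] at this; simpa using this.symm
  have hjl : j + 1 < s.length := (List.getElem?_eq_some_iff.mp hb).1
  have hkl : k < s.length := (List.getElem?_eq_some_iff.mp hbk).1
  have hk : k = j + 1 := by
    have e1 : s[j+1] = b := by
      have := List.getElem?_eq_getElem (l := s) hjl; rw [hb] at this; exact (Option.some.inj this).symm
    have e2 : s[k] = b := by
      have := List.getElem?_eq_getElem (l := s) hkl; rw [hbk] at this; exact (Option.some.inj this).symm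
    exact (hnd.getElem_inj_iff.mp (e2.trans e1.symm))
  have hja : j < s.length := lt_of_le_of_lt (Nat.le_succ j) hjl
  have hdrop : s.drop j = a :: s.drop (j+1) := by
    have hge : s[j] = a := by
      have h0 : s[j]? = some a := by
        have := List.getElem?_drop (xs := s) (i := j) (j := 0)
        rw [← ht] at this; simpa using this.symm
      have := List.getElem?_eq_getElem (l := s) hja; rw [h0] at this; exact (Option.some.inj this).symm
    rw [List.drop_eq_getElem_cons hja, hge]
  refine ⟨j, u, ?_⟩
  rw [List.cons_append, hdrop, ← hk, ← hu]
  simp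

-- (F3) a char cannot sit in both alphabets
lemma pv_disjoint (b : Char) (h1 : b ∈ pvSEQ) (h2 : b ∈ pvNUM) : False := by
  have hs : pvSEQ = ['a','b','c','d','e','f','g','h','i','j','k','l','m',
      'n','o','p','q','r','s','t','u','v','w','x','y','z'] := by decide
  have hn : pvNUM = ['0','1','2','3','4','5','6','7','8','9'] := by decide
  rw [hs] at h1; rw [hn] at h2
  fin_cases h1 <;> exact absurd h2 (by decide)

lemma mem_of_isIn_pair_left (a b : Char) (s : List Char)
    (h : PySem.Chars.isIn [a, b] s = true) : a ∈ s ∧ b ∈ s := by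
  rw [PySem.Chars.isIn_iff_infix] at h
  exact ⟨h.mem (by simp), h.mem (by simp)⟩

-- the pair form of A's length-3 window condition
lemma trip_eq (a b c : Char) :
    ((pvStep a b && pvStep b c) || (pvStep c b && pvStep b a)) = pvChunkCond [a, b, c] := by
  have hndS : pvSEQ.Nodup := by decide
  have hndN : pvNUM.Nodup := by decide
  apply Bool.eq_iff_iff.mpr
  simp only [pvStep, pvChunkCond, Bool.or_eq_true, Bool.and_eq_true, List.reverse_cons]
  simp only [List.nil_append, List.cons_append, List.reverse_nil]
  constructor
  · rintro (⟨h1 | h1, h2 | h2⟩ | ⟨h1 | h1, h2 | h2⟩)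
    · exact Or.inl (Or.inl (isIn_triple_of_pairs a b c _ hndS h1 h2))
    · exact (pv_disjoint b (mem_of_isIn_pair_left a b _ h1).2 (mem_of_isIn_pair_left b c _ h2).1).elim
    · exact (pv_disjoint b (mem_of_isIn_pair_left b c _ h2).1 (mem_of_isIn_pair_left a b _ h1).2).elim
    · exact Or.inr (Or.inl (isIn_triple_of_pairs a b c _ hndN h1 h2))
    · exact Or.inl (Or.inr (isIn_triple_of_pairs c b a _ hndS h1 h2))
    · exact (pv_disjoint b (mem_of_isIn_pair_left c b _ h1).2 (mem_of_isIn_pair_left b a _ h2).1).elim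
    · exact (pv_disjoint b (mem_of_isIn_pair_left b a _ h2).1 (mem_of_isIn_pair_left c b _ h1).2).elim
    · exact Or.inr (Or.inr (isIn_triple_of_pairs c b a _ hndN h1 h2))
  · rintro ((h | h) | (h | h))
    · obtain ⟨h1, h2⟩ := isIn_pair_of_triple a b c _ h; exact Or.inl ⟨Or.inl h1, Or.inl h2⟩
    · obtain ⟨h1, h2⟩ := isIn_pair_of_triple c b a _ h; exact Or.inr ⟨Or.inl h1, Or.inl h2⟩
    · obtain ⟨h1, h2⟩ := isIn_pair_of_triple a b c _ h; exact Or.inl ⟨Or.inr h1, Or.inr h2⟩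
    · obtain ⟨h1, h2⟩ := isIn_pair_of_triple c b a _ h; exact Or.inr ⟨Or.inr h1, Or.inr h2⟩

-- B's loop computes pvSpec2
lemma pvLoop_iff (rest : List Char) : ∀ (prev : Char) (asc desc : Nat), 1 ≤ asc → 1 ≤ desc →
    (pvLoop prev asc desc rest = true ↔
      ((2 ≤ asc ∧ (∃ x l, rest = x :: l ∧ pvStep prev x = true)) ∨
       (2 ≤ desc ∧ (∃ x l, rest = x :: l ∧ pvStep x prev = true)) ∨
       pvSpec2 (prev :: rest) = true)) := by
  induction rest with
  | nil => intro prev asc desc _ _; simp [pvLoop, pvSpec2]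
  | cons x rest' ih =>
    intro prev asc desc ha hd
    have hrec := ih x (if pvStep prev x then asc + 1 else 1) (if pvStep x prev then desc + 1 else 1)
      (by split <;> omega) (by split <;> omega)
    cases rest' with
    | nil =>
      by_cases hpx : pvStep prev x = true <;> by_cases hxp : pvStep x prev = true <;>
        simp [pvLoop, pvSpec2, hpx, hxp]
    | cons y r =>
      by_cases hpx : pvStep prev x = true <;> by_cases hxp : pvStep x prev = true <;>
      by_cases hxy : pvStep x y = true <;> by_cases hyx : pvStep y x = true <;>
      by_cases hs : pvSpec2 (x :: y :: r) = true <;>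
        simp [pvLoop, pvSpec2, hpx, hxp, hxy, hyx, hs] at hrec ⊢ <;>
        (try simp [hrec]) <;> omega

lemma alt_eq_spec2 (l : List Char) :
    (match l with | [] => false | c :: rest => pvLoop c 1 1 rest) = pvSpec2 l := by
  cases l with
  | nil => rfl
  | cons c rest =>
    apply Bool.eq_iff_iff.mpr
    rw [pvLoop_iff rest c 1 1 (le_refl 1) (le_refl 1)]
    simp

-- pvSpec2 as an existential over windows
lemma spec2_iff (l : List Char) :
    pvSpec2 l = true ↔ ∃ k, k + 3 ≤ l.length ∧ pvChunkCond ((l.drop k).take 3) = true := by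
  induction l using pvSpec2.induct with
  | case1 a b c r ih =>
    constructor
    · intro h
      rw [pvSpec2] at h
      rcases (Bool.or_eq_true _ _).mp h with h | h
      · refine ⟨0, by simp, ?_⟩
        simpa [trip_eq] using h
      · obtain ⟨k, hk, hc⟩ := ih.mp h
        exact ⟨k + 1, by simp only [List.length_cons] at hk ⊢; omega, by simpa using hc⟩
    · rintro ⟨k, hk, hc⟩
      rw [pvSpec2, Bool.or_eq_true]
      cases k with
      | zero => exact Or.inl (by simpa [← trip_eq] using hc)
      | succ k' => exact Or.inr (ih.mpr ⟨k', by simp only [List.length_cons] at hk ⊢; omega, by simpa using hc⟩)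
  | case2 l hne =>
    constructor
    · intro h
      exfalso
      cases l with
      | nil => simp [pvSpec2] at h
      | cons a t => cases t with
        | nil => simp [pvSpec2] at h
        | cons b u => cases u with
          | nil => simp [pvSpec2] at h
          | cons c v => exact hne a b c v rfl
    · rintro ⟨k, hk, hc⟩
      exfalso
      cases l with
      | nil => simp at hk
      | cons a t => cases t with
        | nil => simp at hk
        | cons b u => cases u with
          | nil => simp at hk
          | cons c v => exact hne a b c v rfl

-- a window condition survives truncation to its first 3 chars
lemma chunkCond_take (t : List Char) (h : pvChunkCond t = true) : pvChunkCond (t.take 3) = true := by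
  simp only [pvChunkCond, Bool.or_eq_true, PySem.Chars.isIn_iff_infix] at h ⊢
  rcases h with (h | h) | (h | h)
  · exact Or.inl (Or.inl ((List.take_prefix 3 t).isInfix.trans h))
  · exact Or.inl (Or.inr ((List.reverse_suffix.mpr (List.take_prefix 3 t)).isInfix.trans h))
  · exact Or.inr (Or.inl ((List.take_prefix 3 t).isInfix.trans h))
  · exact Or.inr (Or.inr ((List.reverse_suffix.mpr (List.take_prefix 3 t)).isInfix.trans h))

-- A as the same existential
lemma A_iff (pw : String) :
    is_sequential pw = true ↔
      ∃ k, k + 3 ≤ (PySem.Chars.lower pw.toList).length ∧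
        pvChunkCond (((PySem.Chars.lower pw.toList).drop k).take 3) = true := by
  set l := PySem.Chars.lower pw.toList with hl
  have hwin : ∀ (i : Int) (s : Nat), 0 ≤ i →
      PySem.List.slice l (some i) (some (i + (s : Int))) = (l.drop i.toNat).take s := by
    intro i s hi
    rw [PySem.List.slice_toNat l hi (by omega)]
    congr 1
    omega
  have hlen : (PySem.Chars.lower pw.toList).length = l.length := rfl
  have h4 : ((4 : Nat) : Int) = (4 : Int) := rfl
  have h3 : ((3 : Nat) : Int) = (3 : Int) := rfl
  simp only [is_sequential, List.any_cons, List.any_nil, Bool.or_eq_true, Bool.or_false,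
    List.any_eq_true, PySem.List.mem_pyRange_one]
  constructor
  · rintro (⟨i, ⟨hi0, hilt⟩, hcond⟩ | ⟨i, ⟨hi0, hilt⟩, hcond⟩)
    · -- size-4 window: its first three chars form a size-3 window
      rw [← h4, hwin i 4 hi0] at hcond
      refine ⟨i.toNat, by omega, ?_⟩
      have := chunkCond_take ((l.drop i.toNat).take 4)
        (by simpa [pvChunkCond, pvSEQ, pvNUM] using hcond)
      simpa [List.take_take] using this
    · rw [← h3, hwin i 3 hi0] at hcond
      refine ⟨i.toNat, by omega, ?_⟩
      simpa [pvChunkCond, pvSEQ, pvNUM] using hcond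
  · rintro ⟨k, hk, hc⟩
    refine Or.inr ⟨(k : Int), ⟨by omega, by omega⟩, ?_⟩
    rw [← h3, hwin (k : Int) 3 (by omega)]
    simpa [pvChunkCond, pvSEQ, pvNUM] using hc

-- ===== VERDICT (by name: the statement is the Claim_ definition above) =====
theorem is_sequential_spec : Claim_equal_is_sequential := by
  intro pw _
  unfold Spec_is_sequential
  have hB : is_sequential_alt pw = pvSpec2 (PySem.Chars.lower pw.toList) := by
    unfold is_sequential_alt; exact alt_eq_spec2 _
  rw [hB]
  exact Bool.eq_iff_iff.mpr ((A_iff pw).trans (spec2_iff _).symm)
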